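-- pv_equiv track=rewrite | github.com/Rohanjain2312/graphbench | graphbench/community/summarizer.py | _rank_by_entity_frequency
-- ===== SOURCE A (Python) =====
-- from collections import Counter
--
-- def _rank_by_entity_frequency(
--     triples: list[tuple[str, str, str]],
-- ) -> list[tuple[str, str, str]]:
--     """Sort triples so the most central entities appear first.
--
--     Centrality is approximated by raw entity frequency across all triples
--     (subject + object positions). A triple's score is the sum of its
--     subject and object frequencies.
--
--     Args:
--         triples: Unordered list of ``(subject, relation, object)`` triples.
--
--     Returns:
--         Same triples sorted by descending entity-centrality score.
--     """
--     freq: Counter[str] = Counter()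
--     for subj, _, obj in triples:
--         freq[subj] += 1
--         freq[obj] += 1
--
--     return sorted(triples, key=lambda t: freq[t[0]] + freq[t[2]], reverse=True)
-- ===== SOURCE B (Python) =====
-- def _rank_by_entity_frequency(triples):
--     # Count entity frequencies with a plain dict.
--     freq = {}
--     for subj, _, obj in triples:
--         freq[subj] = freq.get(subj, 0) + 1
--         freq[obj] = freq.get(obj, 0) + 1
--
--     # Bucket (counting) sort: one list slot per possible score, triples
--     # appended in original order (stability), buckets emitted highest first.
--     scores = [freq[t[0]] + freq[t[2]] for t in triples]
--     top = max(scores, default=0)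
--     table = [[] for _ in range(top + 1)]
--     for t, sc in zip(triples, scores):
--         table[sc].append(t)
--
--     out = []
--     for bucket in reversed(table):
--         out.extend(bucket)
--     return out
-- ===== Notes on version B (the rewrite author's own statement) =====
-- stated objective: alternative
-- what changed: Replaces the stable comparison sort with a bucket (counting) sort: frequencies are counted with a plain dict, each triple's integer score indexes into a list of buckets filled in original order (stability), and the buckets are emitted from the highest score down.
import Mathlib
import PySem

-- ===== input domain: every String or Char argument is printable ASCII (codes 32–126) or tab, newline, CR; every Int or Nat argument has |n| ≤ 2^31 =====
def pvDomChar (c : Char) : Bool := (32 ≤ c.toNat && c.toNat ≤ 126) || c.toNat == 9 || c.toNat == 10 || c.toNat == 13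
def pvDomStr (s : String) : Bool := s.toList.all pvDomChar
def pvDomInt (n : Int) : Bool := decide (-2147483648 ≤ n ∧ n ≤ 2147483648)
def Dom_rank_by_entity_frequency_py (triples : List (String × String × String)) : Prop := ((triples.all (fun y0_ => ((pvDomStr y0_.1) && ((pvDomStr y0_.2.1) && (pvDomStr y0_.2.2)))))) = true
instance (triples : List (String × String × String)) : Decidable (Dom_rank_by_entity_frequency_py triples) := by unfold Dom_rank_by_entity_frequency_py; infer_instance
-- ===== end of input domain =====

-- B replaces the stable comparison sort with a bucket (counting) sort: one list
-- slot per possible integer score, triples appended in original order, buckets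
-- emitted from the highest score down; equivalence of return values is proved below.

-- ===== PORT A =====
def rank_by_entity_frequency_py (triples : List (String × String × String)) : List (String × String × String) :=
  -- freq = Counter(); for subj, _, obj in triples: freq[subj] += 1; freq[obj] += 1
  let freq : PySem.Dict String Int :=
    triples.foldl (fun d t => (d.modify t.1 0 (· + 1)).modify t.2.2 0 (· + 1)) PySem.Dict.empty
  -- sorted(triples, key=lambda t: freq[t[0]] + freq[t[2]], reverse=True)
  PySem.List.sorted triples (fun t => freq.getD t.1 0 + freq.getD t.2.2 0) true

-- ===== PORT B =====
def rank_by_entity_frequency_py_alt (triples : List (String × String × String)) : List (String × String × String) :=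
  -- freq = {}; for subj, _, obj in triples:
  --   freq[subj] = freq.get(subj, 0) + 1; freq[obj] = freq.get(obj, 0) + 1
  let freq : PySem.Dict String Int :=
    triples.foldl (fun d t =>
      let d1 := d.insert t.1 (d.getD t.1 0 + 1)
      d1.insert t.2.2 (d1.getD t.2.2 0 + 1)) PySem.Dict.empty
  -- scores = [freq[t[0]] + freq[t[2]] for t in triples]
  let scores : List Int := triples.map (fun t => freq.getD t.1 0 + freq.getD t.2.2 0)
  -- top = max(scores, default=0)
  let top : Int := PySem.List.maxD scores (fun x => x) 0
  -- table = [[] for _ in range(top + 1)]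
  -- (scores are sums of nonnegative counts, so '.toNat' below is exact: no Python
  --  negative-index wrap is reachable, and every score is ≤ top by max)
  let table0 : List (List (String × String × String)) := List.replicate (top + 1).toNat []
  -- for t, sc in zip(triples, scores): table[sc].append(t)
  let table := (triples.zip scores).foldl
    (fun tb p => tb.set p.2.toNat ((tb.getD p.2.toNat []) ++ [p.1])) table0
  -- out = []; for bucket in reversed(table): out.extend(bucket)
  table.reverse.foldl (fun acc b => acc ++ b) []

-- ===== PRECONDITION & SPEC =====
def Spec_rank_by_entity_frequency_py (triples : List (String × String × String)) (out : List (String × String × String)) : Prop := out = rank_by_entity_frequency_py_alt triples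
instance (triples : List (String × String × String)) (out : List (String × String × String)) : Decidable (Spec_rank_by_entity_frequency_py triples out) := by unfold Spec_rank_by_entity_frequency_py; infer_instance

-- ===== CLAIM (what is proved, stated in full; the proofs are below) =====
def Claim_equal_rank_by_entity_frequency_py : Prop := ∀ (triples : List (String × String × String)), Dom_rank_by_entity_frequency_py triples → Spec_rank_by_entity_frequency_py triples (rank_by_entity_frequency_py triples)

-- ===== LEMMAS AND PROOFS =====

-- inserting past a prefix none of whose elements trigger `before`
theorem pv_insertBy_append {α : Type} (before : α → α → Bool) (x : α) (l1 l2 : List α)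
    (h : ∀ y ∈ l1, before x y = false) :
    PySem.List.insertBy before x (l1 ++ l2) = l1 ++ PySem.List.insertBy before x l2 := by
  induction l1 with
  | nil => simp
  | cons y ys ih =>
      have hy := h y (by simp)
      simp only [List.cons_append, PySem.List.insertBy, hy, Bool.false_eq_true, if_false]
      rw [ih (fun z hz => h z (by simp [hz]))]

theorem pv_insertBy_all_true {α : Type} (before : α → α → Bool) (x : α) (l : List α)
    (h : ∀ y ∈ l, before x y = true) :
    PySem.List.insertBy before x l = x :: l := by
  cases l with
  | nil => rfl
  | cons y ys => simp [PySem.List.insertBy, h y (by simp)]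

-- inserting x into descending buckets appends it at the end of its own bucket
theorem pv_insertBy_flatMap {α : Type} (key : α → Int) (x : α) (f : Int → List α)
    (ss : List Int) (hss : ss.Pairwise (fun a b => b < a)) (hx : key x ∈ ss)
    (hf : ∀ s, ∀ y ∈ f s, key y = s) :
    PySem.List.insertBy (fun a b => decide (key b < key a)) x (ss.flatMap f)
      = ss.flatMap (fun s => f s ++ if key x == s then [x] else []) := by
  induction ss with
  | nil => cases hx
  | cons s ss' ih =>
      have hlt : ∀ z ∈ ss', z < s := fun z hz => (List.pairwise_cons.mp hss).1 z hz
      have hss' : ss'.Pairwise (fun a b => b < a) := (List.pairwise_cons.mp hss).2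
      simp only [List.flatMap_cons]
      by_cases hks : key x = s
      · subst hks
        have h1 : ∀ y ∈ f (key x), (fun a b => decide (key b < key a)) x y = false := by
          intro y hy; simp [hf (key x) y hy]
        rw [pv_insertBy_append _ _ _ _ h1]
        have h2 : ∀ y ∈ ss'.flatMap f, (fun a b => decide (key b < key a)) x y = true := by
          intro y hy
          rcases List.mem_flatMap.mp hy with ⟨s', hs', hy'⟩
          simp [hf s' y hy', hlt s' hs']
        rw [pv_insertBy_all_true _ _ _ h2]
        have h3 : ss'.flatMap (fun s' => f s' ++ if key x == s' then [x] else []) = ss'.flatMap f := by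
          apply List.flatMap_congr
          intro s' hs'
          have : (key x == s') = false := by
            simp only [beq_eq_false_iff_ne]; intro h; exact absurd (hlt s' hs') (by omega)
          simp [this]
        rw [h3]
        simp
      · have hx' : key x ∈ ss' := by
          cases hx with
          | head => exact absurd rfl hks
          | tail _ h => exact h
        have hxs : key x < s := hlt _ hx'
        have h1 : ∀ y ∈ f s, (fun a b => decide (key b < key a)) x y = false := by
          intro y hy; simp [hf s y hy]; omega
        rw [pv_insertBy_append _ _ _ _ h1, ih hss' hx']
        have : (key x == s) = false := by simp [hks]
        simp [this]

-- the stable descending sort is the concatenation of the score buckets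
theorem pv_sorted_rev_eq_flatMap {α : Type} (key : α → Int) (xs : List α)
    (ss : List Int) (hss : ss.Pairwise (fun a b => b < a))
    (hcov : ∀ t ∈ xs, key t ∈ ss) :
    PySem.List.sorted xs key true = ss.flatMap (fun s => xs.filter (fun t => key t == s)) := by
  induction xs using List.reverseRecOn with
  | nil =>
      have h0 : List.flatMap (fun s : Int => List.filter (fun t => key t == s) []) ss = [] := by
        simp
      rw [h0, PySem.List.sorted_eq_nil_iff]
  | append_singleton xs x ih =>
      have hcov' : ∀ t ∈ xs, key t ∈ ss := fun t ht => hcov t (by simp [ht])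
      rw [PySem.List.sorted_rev_eq_foldl_insertBy, List.foldl_append,
          ← PySem.List.sorted_rev_eq_foldl_insertBy, ih hcov']
      simp only [List.foldl_cons, List.foldl_nil]
      rw [pv_insertBy_flatMap key x _ ss hss (hcov x (by simp))
          (fun s y hy => by simpa using (List.mem_filter.mp hy).2)]
      apply List.flatMap_congr
      intro s _
      rw [List.filter_append]
      simp [List.filter_singleton]

-- A's Counter loop: lookups are occurrence counts in the subject/object stream
theorem pv_freqA_getD_gen (triples : List (String × String × String))
    (d : PySem.Dict String Int) (x : String) :
    (triples.foldl (fun d t => (d.modify t.1 0 (· + 1)).modify t.2.2 0 (· + 1)) d).getD x 0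
      = d.getD x 0 + ((triples.flatMap (fun t => [t.1, t.2.2])).count x : Int) := by
  induction triples generalizing d with
  | nil => simp
  | cons t ts ih =>
      simp only [List.foldl_cons, List.flatMap_cons, List.count_append, ih]
      rcases eq_or_ne x t.2.2 with h1 | h1 <;> rcases eq_or_ne x t.1 with h2 | h2
      · simp [← h1, ← h2]; ring
      · simp [PySem.Dict.getD_modify, ← h1, h2, Ne.symm h2]; ring
      · simp [PySem.Dict.getD_modify, h1, ← h2]; ring
      · simp [PySem.Dict.getD_modify, h1, h2, Ne.symm h1, Ne.symm h2]

theorem pv_freqA_getD (triples : List (String × String × String)) (x : String) :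
    (triples.foldl (fun d t => (d.modify t.1 0 (· + 1)).modify t.2.2 0 (· + 1))
        PySem.Dict.empty).getD x 0
      = ((triples.flatMap (fun t => [t.1, t.2.2])).count x : Int) := by
  rw [pv_freqA_getD_gen]; simp

-- B's dict.get loop computes the same counts
theorem pv_freqB_getD_gen (triples : List (String × String × String))
    (d : PySem.Dict String Int) (x : String) :
    (triples.foldl (fun d t =>
        let d1 := d.insert t.1 (d.getD t.1 0 + 1)
        d1.insert t.2.2 (d1.getD t.2.2 0 + 1)) d).getD x 0
      = d.getD x 0 + ((triples.flatMap (fun t => [t.1, t.2.2])).count x : Int) := by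
  induction triples generalizing d with
  | nil => simp
  | cons t ts ih =>
      simp only [List.foldl_cons, List.flatMap_cons, List.count_append, ih]
      rcases eq_or_ne x t.2.2 with h1 | h1 <;> rcases eq_or_ne x t.1 with h2 | h2
      · simp [← h1, ← h2]; ring
      · simp [PySem.Dict.getD_insert, ← h1, h2, Ne.symm h2]; ring
      · simp [PySem.Dict.getD_insert, h1, ← h2, Ne.symm h1]; ring
      · simp [PySem.Dict.getD_insert, h1, h2, Ne.symm h1, Ne.symm h2]

theorem pv_freqB_getD (triples : List (String × String × String)) (x : String) :
    (triples.foldl (fun d t =>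
        let d1 := d.insert t.1 (d.getD t.1 0 + 1)
        d1.insert t.2.2 (d1.getD t.2.2 0 + 1)) PySem.Dict.empty).getD x 0
      = ((triples.flatMap (fun t => [t.1, t.2.2])).count x : Int) := by
  rw [pv_freqB_getD_gen]; simp

-- the bucket table after the fold: slot i holds the score-i triples in order
theorem pv_table_spec {α : Type} (key : α → Nat) (xs : List α) (m : Nat)
    (hx : ∀ t ∈ xs, key t < m) :
    xs.foldl (fun tb t => tb.set (key t) ((tb.getD (key t) []) ++ [t]))
        (List.replicate m ([] : List α))
      = (List.range m).map (fun i => xs.filter (fun t => key t == i)) := by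
  induction xs using List.reverseRecOn with
  | nil =>
      simp only [List.foldl_nil, List.filter_nil]
      rw [List.map_const', List.length_range]
  | append_singleton xs x ih =>
      have hx' : ∀ t ∈ xs, key t < m := fun t ht => hx t (by simp [ht])
      rw [List.foldl_append, ih hx']
      simp only [List.foldl_cons, List.foldl_nil]
      have hkx : key x < m := hx x (by simp)
      have hget : ((List.range m).map
          (fun i => xs.filter (fun t => key t == i))).getD (key x) []
            = xs.filter (fun t => key t == key x) := by
        rw [List.getD_eq_getElem?_getD, List.getElem?_map]
        simp [List.getElem?_range hkx]
      rw [hget]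
      apply List.ext_getElem?
      intro i
      rw [List.getElem?_set]
      by_cases hi : key x = i
      · subst hi
        simp only [List.length_map, List.length_range, if_pos hkx,
          List.getElem?_map, List.getElem?_range hkx, Option.map_some]
        rw [List.filter_append]
        simp
      · rw [if_neg hi]
        simp only [List.getElem?_map]
        by_cases him : i < m
        · simp only [List.getElem?_range him, Option.map_some]
          rw [List.filter_append]
          have : (key x == i) = false := by simpa using hi
          simp [this]
        · have : (List.range m)[i]? = none := by
            rw [List.getElem?_eq_none_iff]; simpa using him
          simp [this]

-- ===== VERDICT (by name: the statement is the Claim_ definition above) =====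
theorem rank_by_entity_frequency_py_spec : Claim_equal_rank_by_entity_frequency_py := by
  intro triples _
  unfold Spec_rank_by_entity_frequency_py rank_by_entity_frequency_py rank_by_entity_frequency_py_alt
  simp only []
  -- the common score function
  set L : List String := triples.flatMap (fun t => [t.1, t.2.2]) with hL
  set key : (String × String × String) → Int :=
    fun t => (L.count t.1 : Int) + (L.count t.2.2 : Int) with hkey
  have hkeyA : (fun t : String × String × String =>
      (triples.foldl (fun d t => (d.modify t.1 0 (· + 1)).modify t.2.2 0 (· + 1))
        PySem.Dict.empty).getD t.1 0 +
      (triples.foldl (fun d t => (d.modify t.1 0 (· + 1)).modify t.2.2 0 (· + 1))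
        PySem.Dict.empty).getD t.2.2 0) = key := by
    funext t; rw [hkey, pv_freqA_getD, pv_freqA_getD]
  have hkeyB : (fun t : String × String × String =>
      (triples.foldl (fun d t =>
        let d1 := d.insert t.1 (d.getD t.1 0 + 1)
        d1.insert t.2.2 (d1.getD t.2.2 0 + 1)) PySem.Dict.empty).getD t.1 0 +
      (triples.foldl (fun d t =>
        let d1 := d.insert t.1 (d.getD t.1 0 + 1)
        d1.insert t.2.2 (d1.getD t.2.2 0 + 1)) PySem.Dict.empty).getD t.2.2 0) = key := by
    funext t; rw [hkey, pv_freqB_getD, pv_freqB_getD]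
  rw [hkeyA, hkeyB]
  have hkey0 : ∀ t, 0 ≤ key t := by intro t; rw [hkey]; positivity
  -- the maximum score bounds every score
  set top : Int := PySem.List.maxD (triples.map key) (fun x => x) 0 with htop
  have htople : ∀ t ∈ triples, key t ≤ top := by
    intro t ht
    have hmem : key t ∈ triples.map key := List.mem_map.mpr ⟨t, ht, rfl⟩
    rcases h : PySem.List.max? (triples.map key) (fun x => x) with _ | m
    · rw [PySem.List.max?_eq_none_iff] at h
      simp [h] at hmem
    · have := PySem.List.max?_isMax h (key t) hmem
      have htopm : top = m := by
        rw [htop]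
        show (PySem.List.max? (triples.map key) (fun x => x)).getD 0 = m
        rw [h]; rfl
      simpa [htopm] using this
  have htop0 : 0 ≤ top := by
    rcases h : PySem.List.max? (triples.map key) (fun x => x) with _ | m
    · rw [htop]
      show 0 ≤ (PySem.List.max? (triples.map key) (fun x => x)).getD 0
      rw [h]; rfl
    · have hm := PySem.List.max?_mem h
      rcases List.mem_map.mp hm with ⟨t, _, rfl⟩
      have htopm : top = key t := by
        rw [htop]
        show (PySem.List.max? (triples.map key) (fun x => x)).getD 0 = key t
        rw [h]; rfl
      rw [htopm]; exact hkey0 t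
  set m : Nat := (top + 1).toNat with hm
  have hbound : ∀ t ∈ triples, (key t).toNat < m := by
    intro t ht
    have h1 := htople t ht
    have h2 := hkey0 t
    omega
  -- rewrite B's zip-fold as a fold over the triples
  have hzip : ∀ l : List (String × String × String),
      l.zip (l.map key) = l.map (fun t => (t, key t)) := by
    intro l; induction l with
    | nil => rfl
    | cons a l ih => simp [ih]
  rw [hzip, List.foldl_map]
  rw [pv_table_spec (fun t => (key t).toNat) triples m hbound]
  -- B's output: flatten the reversed bucket table
  rw [PySem.List.foldl_append_eq_flatten]
  rw [← List.map_reverse, List.flatten_eq_flatMap, List.flatMap_map]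
  -- A's output: the descending stable sort as buckets over the descending scores
  set ss : List Int := (List.range m).reverse.map (fun i : Nat => (i : Int)) with hss
  have hpw : ss.Pairwise (fun a b => b < a) := by
    rw [hss, List.pairwise_map, List.pairwise_reverse]
    have := List.pairwise_lt_range (n := m)
    exact this.imp (by intro a b h; exact_mod_cast h)
  have hcov : ∀ t ∈ triples, key t ∈ ss := by
    intro t ht
    rw [hss, List.mem_map]
    refine ⟨(key t).toNat, ?_, ?_⟩
    · rw [List.mem_reverse, List.mem_range]; exact hbound t ht
    · have := hkey0 t; omega
  rw [pv_sorted_rev_eq_flatMap key triples ss hpw hcov, hss, List.flatMap_map]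
  simp only [List.nil_append, id_eq]
  apply List.flatMap_congr
  intro i _
  apply List.filter_congr
  intro t ht
  have h0 := hkey0 t
  rw [Bool.eq_iff_iff]
  simp only [beq_iff_eq]
  omega
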